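-- pv_equiv track=rewrite | github.com/deepakdeo/cte-project | src/cte/requirements.py | union_requirements
-- ===== SOURCE A (Python) =====
-- def union_requirements(req_a, req_b):
--     rank = {"low":0,"medium":1,"high":2}
--     best = {}
--     for r in (req_a or []):
--         t, l = r.get("trait","").lower().strip(), r.get("required_level","medium").lower().strip()
--         if not t: continue
--         if t not in best or rank[l] > rank.get(best[t],0):
--             best[t] = l
--     for r in (req_b or []):
--         t, l = r.get("trait","").lower().strip(), r.get("required_level","medium").lower().strip()
--         if not t: continue
--         if t not in best or rank[l] > rank.get(best[t],0):
--             best[t] = l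
--     return [{"trait": t, "required_level": best[t]} for t in best]
-- ===== SOURCE B (Python) =====
-- def union_requirements(req_a, req_b):
--     rank = {"low": 0, "medium": 1, "high": 2}
--     groups = {}
--     for r in (req_a or []) + (req_b or []):
--         t = r.get("trait", "").lower().strip()
--         if t:
--             groups.setdefault(t, []).append(r.get("required_level", "medium").lower().strip())
--     return [{"trait": t, "required_level": max(ls, key=lambda x: rank.get(x, 0))}
--             for t, ls in groups.items()]
-- ===== Notes on version B (the rewrite author's own statement) =====
-- stated objective: alternative
-- what changed: B replaces A's online running-max over two separate loops (comparing ranks while scanning and mutating a best-level dict) with a collect-then-reduce decomposition: one pass over the concatenated lists groups all stripped/lowercased levels per trait, then a comprehension takes max(levels, key=rank.get) per trait.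
import Mathlib
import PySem

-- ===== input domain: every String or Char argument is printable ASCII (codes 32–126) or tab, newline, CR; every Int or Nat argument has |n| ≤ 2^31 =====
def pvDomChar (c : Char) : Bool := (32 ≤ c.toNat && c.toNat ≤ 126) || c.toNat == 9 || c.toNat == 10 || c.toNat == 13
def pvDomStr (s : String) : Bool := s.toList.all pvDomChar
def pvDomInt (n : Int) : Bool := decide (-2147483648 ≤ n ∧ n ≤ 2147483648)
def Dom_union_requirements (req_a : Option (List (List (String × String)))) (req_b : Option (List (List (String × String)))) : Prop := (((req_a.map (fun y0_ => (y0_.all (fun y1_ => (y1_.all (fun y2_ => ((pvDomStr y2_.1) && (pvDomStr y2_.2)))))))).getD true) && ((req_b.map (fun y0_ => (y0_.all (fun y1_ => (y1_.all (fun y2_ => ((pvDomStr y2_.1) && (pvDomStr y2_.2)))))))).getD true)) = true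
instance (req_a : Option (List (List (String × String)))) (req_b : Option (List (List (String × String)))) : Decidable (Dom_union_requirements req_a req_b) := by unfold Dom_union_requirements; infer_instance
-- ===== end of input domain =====

-- B replaces A's online running-max (two loops mutating a best-level dict) with one grouping
-- pass plus a per-trait max(levels, key=rank.get) reduction; same cost, different decomposition.
-- ===== PORT A =====
-- r.get(k, dflt) on the Python dict r (duplicate keys in the assoc list: last wins, as dict(r))
def pvGet (r : List (String × String)) (k : String) (dflt : String) : String :=
  (PySem.Dict.ofList r).getD k dflt

def pvTrait (r : List (String × String)) : String :=
  PySem.Str.strip (PySem.Str.lower (pvGet r "trait" ""))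

def pvLevel (r : List (String × String)) : String :=
  PySem.Str.strip (PySem.Str.lower (pvGet r "required_level" "medium"))

-- rank[l] as first-match lookup in the literal dict {"low":0,"medium":1,"high":2}; none = KeyError
def pvRank? (l : String) : Option Int :=
  if l = "low" then some 0 else if l = "medium" then some 1 else if l = "high" then some 2 else none

-- body of A's (identical) two loops
def pvStepA (best : PySem.Dict String String) (r : List (String × String)) : PySem.Dict String String :=
  let t := pvTrait r
  let l := pvLevel r
  if t = "" then best
  else if best.contains t = false then best.insert t l
  else
    match pvRank? l with
    | none => best   -- Python raises KeyError here; Pre_union_requirements excludes these inputs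
    | some rl => if rl > (pvRank? (best.getD t "")).getD 0 then best.insert t l else best

def union_requirements (req_a : Option (List (List (String × String)))) (req_b : Option (List (List (String × String)))) : List (List (String × String)) :=
  let best := (req_a.getD []).foldl pvStepA PySem.Dict.empty
  let best := (req_b.getD []).foldl pvStepA best
  best.keys.map (fun t => [("trait", t), ("required_level", best.getD t "")])

-- ===== PORT B =====
def pvKeyB (x : String) : Int := (pvRank? x).getD 0   -- rank.get(x, 0)

-- groups.setdefault(t, []).append(l)
def pvStepB (g : PySem.Dict String (List String)) (r : List (String × String)) : PySem.Dict String (List String) :=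
  let t := pvTrait r
  if t = "" then g else g.modify t [] (fun ls => ls ++ [pvLevel r])

def union_requirements_alt (req_a : Option (List (List (String × String)))) (req_b : Option (List (List (String × String)))) : List (List (String × String)) :=
  let groups := ((req_a.getD []) ++ (req_b.getD [])).foldl pvStepB PySem.Dict.empty
  -- every stored group is nonempty, so max(ls, key=…) never sees []; .getD "" is unreachable
  groups.items.map (fun p => [("trait", p.1), ("required_level", (PySem.List.max? p.2 pvKeyB).getD "")])

-- ===== PRECONDITION & SPEC =====
-- Pre_ excludes exactly the inputs on which A raises KeyError: a requirement whose non-empty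
-- trait already occurred earlier and whose level is outside {"low","medium","high"}.
def Pre_union_requirements (req_a : Option (List (List (String × String)))) (req_b : Option (List (List (String × String)))) : Prop :=
  List.Pairwise
    (fun r r' => pvTrait r' ≠ "" → pvTrait r = pvTrait r' → (pvRank? (pvLevel r')).isSome = true)
    ((req_a.getD []) ++ (req_b.getD []))
instance (req_a : Option (List (List (String × String)))) (req_b : Option (List (List (String × String)))) : Decidable (Pre_union_requirements req_a req_b) := by unfold Pre_union_requirements; infer_instance

def pvWitness_union_requirements : (Option (List (List (String × String)))) × (Option (List (List (String × String)))) :=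
  (some [[("trait", "Focus "), ("required_level", "HIGH")]], some [[("trait", "focus"), ("required_level", "low")], [("trait", "calm")]])

def Spec_union_requirements (req_a : Option (List (List (String × String)))) (req_b : Option (List (List (String × String)))) (out : List (List (String × String))) : Prop := out = union_requirements_alt req_a req_b
instance (req_a : Option (List (List (String × String)))) (req_b : Option (List (List (String × String)))) (out : List (List (String × String))) : Decidable (Spec_union_requirements req_a req_b out) := by unfold Spec_union_requirements; infer_instance

-- ===== CLAIM (what is proved, stated in full; the proofs are below) =====
def Claim_equal_union_requirements : Prop := ∀ (req_a : Option (List (List (String × String)))) (req_b : Option (List (List (String × String)))), Dom_union_requirements req_a req_b → Pre_union_requirements req_a req_b → Spec_union_requirements req_a req_b (union_requirements req_a req_b)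

-- ===== LEMMAS AND PROOFS =====
-- the invariant tying A's best dict to B's groups dict after processing the same prefix
def pvInv (best : PySem.Dict String String) (g : PySem.Dict String (List String)) : Prop :=
  g.keys = best.keys ∧ best.keys.Nodup ∧
  ∀ t v, best.get? t = some v →
    ∃ gls, g.get? t = some gls ∧ PySem.List.max? gls pvKeyB = some v

lemma pvInv_contains {best : PySem.Dict String String} {g : PySem.Dict String (List String)}
    (h : pvInv best g) (t : String) : g.contains t = best.contains t := by
  rw [PySem.Dict.contains_eq_decide_mem_keys, PySem.Dict.contains_eq_decide_mem_keys, h.1]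

lemma pvMax_append_singleton (gls : List String) (l v : String)
    (h : PySem.List.max? gls pvKeyB = some v) :
    PySem.List.max? (gls ++ [l]) pvKeyB =
      if pvKeyB v < pvKeyB l then some l else some v := by
  unfold PySem.List.max? at h ⊢
  rw [List.foldl_append, h]
  simp [List.foldl]

lemma pvStep_inv (best : PySem.Dict String String) (g : PySem.Dict String (List String))
    (r : List (String × String)) (h : pvInv best g)
    (hok : pvTrait r ≠ "" → best.contains (pvTrait r) = true → (pvRank? (pvLevel r)).isSome = true) :
    pvInv (pvStepA best r) (pvStepB g r) := by
  obtain ⟨hk, hnd, hget⟩ := h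
  unfold pvStepA pvStepB
  by_cases ht : pvTrait r = ""
  · simp only [ht, if_true]
    exact ⟨hk, hnd, hget⟩
  · simp only [if_neg ht]
    by_cases hc : best.contains (pvTrait r) = true
    · -- the trait is already present on both sides
      rw [if_neg (show ¬ best.contains (pvTrait r) = false from by simp [hc])]
      obtain ⟨v, hv⟩ := Option.isSome_iff_exists.mp
        ((PySem.Dict.contains_eq_isSome_get? best (pvTrait r)) ▸ hc)
      obtain ⟨gls, hg, hmax⟩ := hget _ _ hv
      have hgc : g.contains (pvTrait r) = true := by
        rw [pvInv_contains ⟨hk, hnd, hget⟩]; exact hc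
      obtain ⟨rl, hrl⟩ := Option.isSome_iff_exists.mp (hok ht hc)
      have hkeyl : pvKeyB (pvLevel r) = rl := by simp [pvKeyB, hrl]
      have hBD : g.getD (pvTrait r) [] = gls := PySem.Dict.getD_of_get?_eq_some g [] hg
      have hAD : best.getD (pvTrait r) "" = v := PySem.Dict.getD_of_get?_eq_some best "" hv
      rw [PySem.Dict.modify, hBD, hrl, hAD]
      show pvInv
        (if rl > (pvRank? v).getD 0 then best.insert (pvTrait r) (pvLevel r) else best)
        (g.insert (pvTrait r) (gls ++ [pvLevel r]))
      have hmax' := pvMax_append_singleton gls (pvLevel r) v hmax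
      by_cases hcmp : pvKeyB v < pvKeyB (pvLevel r)
      · have : rl > (pvRank? v).getD 0 := by
          have : pvKeyB v < rl := hkeyl ▸ hcmp
          simpa [pvKeyB] using this
        rw [if_pos this]
        refine ⟨by rw [PySem.Dict.keys_insert_of_contains _ _ hgc,
                       PySem.Dict.keys_insert_of_contains _ _ hc, hk],
                by rw [PySem.Dict.keys_insert_of_contains _ _ hc]; exact hnd, ?_⟩
        intro t' v' h'
        rw [PySem.Dict.get?_insert] at h'
        by_cases he : t' = pvTrait r
        · rw [if_pos he] at h'
          refine ⟨gls ++ [pvLevel r], ?_, ?_⟩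
          · rw [PySem.Dict.get?_insert, if_pos he]
          · rw [hmax', if_pos hcmp, ← Option.some_inj.mp h']
        · rw [if_neg he] at h'
          obtain ⟨gls', hg', hm'⟩ := hget _ _ h'
          exact ⟨gls', by rw [PySem.Dict.get?_insert, if_neg he]; exact hg', hm'⟩
      · have : ¬ rl > (pvRank? v).getD 0 := by
          have : ¬ pvKeyB v < rl := hkeyl ▸ hcmp
          simpa [pvKeyB] using this
        rw [if_neg this]
        refine ⟨by rw [PySem.Dict.keys_insert_of_contains _ _ hgc, hk], hnd, ?_⟩
        intro t' v' h'
        by_cases he : t' = pvTrait r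
        · refine ⟨gls ++ [pvLevel r], by rw [PySem.Dict.get?_insert, if_pos he], ?_⟩
          rw [hmax', if_neg hcmp]
          rw [he, hv] at h'
          exact h' 
        · obtain ⟨gls', hg', hm'⟩ := hget _ _ h'
          exact ⟨gls', by rw [PySem.Dict.get?_insert, if_neg he]; exact hg', hm'⟩
    · -- a fresh trait: both sides append it
      have hc' : best.contains (pvTrait r) = false := by
        cases hcb : best.contains (pvTrait r) with
        | false => rfl
        | true => exact absurd hcb hc
      rw [if_pos hc']
      have hgc : g.contains (pvTrait r) = false := by
        rw [pvInv_contains ⟨hk, hnd, hget⟩]; exact hc'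
      have hBD : g.getD (pvTrait r) [] = [] := PySem.Dict.getD_of_not_contains g [] hgc
      rw [PySem.Dict.modify, hBD]
      have hmem : pvTrait r ∉ best.keys := by
        intro hm
        exact hc ((PySem.Dict.contains_iff_mem_keys _ _).mpr hm)
      refine ⟨by rw [PySem.Dict.keys_insert_of_not_contains _ _ hgc,
                     PySem.Dict.keys_insert_of_not_contains _ _ hc', hk],
              by rw [PySem.Dict.keys_insert_of_not_contains _ _ hc']
                 exact List.Nodup.append hnd (List.nodup_singleton _)
                   (by simpa using fun hmm => hmem hmm), ?_⟩
      intro t' v' h'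
      rw [PySem.Dict.get?_insert] at h'
      by_cases he : t' = pvTrait r
      · rw [if_pos he] at h'
        refine ⟨[] ++ [pvLevel r], by rw [PySem.Dict.get?_insert, if_pos he], ?_⟩
        rw [← Option.some_inj.mp h']
        simp [PySem.List.max?]
      · rw [if_neg he] at h'
        obtain ⟨gls', hg', hm'⟩ := hget _ _ h'
        exact ⟨gls', by rw [PySem.Dict.get?_insert, if_neg he]; exact hg', hm'⟩

lemma pvStepA_contains (best : PySem.Dict String String) (r : List (String × String)) (t : String)
    (h : (pvStepA best r).contains t = true) : best.contains t = true ∨ t = pvTrait r := by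
  unfold pvStepA at h
  by_cases ht : pvTrait r = ""
  · simp only [ht, if_true] at h; exact Or.inl h
  · simp only [if_neg ht] at h
    by_cases hc : best.contains (pvTrait r) = false
    · rw [if_pos hc, PySem.Dict.contains_insert] at h
      rcases (Bool.or_eq_true _ _).mp h with h' | h'
      · exact Or.inr (by simpa using h')
      · exact Or.inl h'
    · rw [if_neg hc] at h
      cases hr : pvRank? (pvLevel r) with
      | none => rw [hr] at h; exact Or.inl h
      | some rl =>
        rw [hr] at h
        dsimp only at h
        by_cases hcmp : rl > (pvRank? (best.getD (pvTrait r) "")).getD 0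
        · rw [if_pos hcmp, PySem.Dict.contains_insert] at h
          rcases (Bool.or_eq_true _ _).mp h with h' | h'
          · exact Or.inr (by simpa using h')
          · exact Or.inl h'
        · rw [if_neg hcmp] at h; exact Or.inl h

lemma pvFold_inv : ∀ (es : List (List (String × String)))
    (best : PySem.Dict String String) (g : PySem.Dict String (List String)),
    pvInv best g →
    (∀ r ∈ es, pvTrait r ≠ "" → best.contains (pvTrait r) = true → (pvRank? (pvLevel r)).isSome = true) →
    List.Pairwise (fun r r' => pvTrait r' ≠ "" → pvTrait r = pvTrait r' → (pvRank? (pvLevel r')).isSome = true) es →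
    pvInv (es.foldl pvStepA best) (es.foldl pvStepB g) := by
  intro es
  induction es with
  | nil => intro best g h _ _; exact h
  | cons r rest ih =>
    intro best g h hok hp
    rw [List.pairwise_cons] at hp
    simp only [List.foldl_cons]
    refine ih _ _ (pvStep_inv best g r h (hok r List.mem_cons_self)) ?_ hp.2
    intro r' hr' ht' hc'
    rcases pvStepA_contains best r (pvTrait r') hc' with h' | h'
    · exact hok r' (List.mem_cons_of_mem _ hr') ht' h'
    · exact hp.1 r' hr' ht' h'.symm

-- ===== VERDICT (by name: the statement is the Claim_ definition above) =====
theorem union_requirements_spec : Claim_equal_union_requirements := by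
  intro req_a req_b _ hpre
  unfold Spec_union_requirements
  show union_requirements req_a req_b = union_requirements_alt req_a req_b
  unfold union_requirements union_requirements_alt
  simp only [← List.foldl_append]
  set es := (req_a.getD []) ++ (req_b.getD []) with hes
  have hinv := pvFold_inv es PySem.Dict.empty PySem.Dict.empty
    ⟨rfl, by simp [PySem.Dict.keys_empty], fun t v h => by simp [PySem.Dict.get?_empty] at h⟩
    (fun r _ _ hc => by simp [PySem.Dict.contains_empty] at hc)
    hpre
  obtain ⟨hk, hnd, hget⟩ := hinv
  set A := es.foldl pvStepA PySem.Dict.empty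
  set B := es.foldl pvStepB PySem.Dict.empty
  rw [PySem.Dict.items_eq_map_keys B (hk ▸ hnd) [], List.map_map, hk]
  apply List.map_congr_left
  intro k hkm
  have hc : A.contains k = true := (PySem.Dict.contains_iff_mem_keys _ _).mpr hkm
  obtain ⟨v, hv⟩ := Option.isSome_iff_exists.mp
    ((PySem.Dict.contains_eq_isSome_get? A k) ▸ hc)
  obtain ⟨gls, hg, hmax⟩ := hget _ _ hv
  simp only [Function.comp]
  rw [PySem.Dict.getD_of_get?_eq_some A "" hv, PySem.Dict.getD_of_get?_eq_some B [] hg, hmax]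
  rfl
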